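-- pv_equiv track=rewrite | github.com/yoka255/ProjectEuler | 200-299/231.py | psum
-- ===== SOURCE A (Python) =====
-- def psum(x, primes):
-- 	res = 0
-- 	for pr in primes:
-- 		mul = pr
-- 		while mul <= x:
-- 			res += (x//mul)*pr
-- 			mul *= pr
-- 	return res
-- ===== SOURCE B (Python) =====
-- def psum(x, primes):
--     # Legendre: exponent of pr in x! is (x - digsum(x, pr)) / (pr - 1),
--     # where digsum is the sum of the base-pr digits of x.
--     if x <= 0:
--         return 0
--     return sum(pr * (x - digsum(x, pr)) // (pr - 1) for pr in primes)
--
-- def digsum(n, pr):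
--     return 0 if n == 0 else n % pr + digsum(n // pr, pr)
-- ===== Notes on version B (the rewrite author's own statement) =====
-- stated objective: alternative
-- what changed: B replaces A's per-prime loop over successive powers pr^k accumulating floor(x/pr^k)*pr by a recursive base-pr digit sum plus Legendre's identity, summed over primes with a generator expression instead of A's accumulator loop; same O(log_pr x) cost per prime.
-- outside the precondition, e.g. on psum(10, [-2]): A returns 10, B returns 8; on psum(-3, [-3]): A returns -3, B returns 0; on psum(5, [0]): A raises ZeroDivisionError, B raises ZeroDivisionError
import Mathlib
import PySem

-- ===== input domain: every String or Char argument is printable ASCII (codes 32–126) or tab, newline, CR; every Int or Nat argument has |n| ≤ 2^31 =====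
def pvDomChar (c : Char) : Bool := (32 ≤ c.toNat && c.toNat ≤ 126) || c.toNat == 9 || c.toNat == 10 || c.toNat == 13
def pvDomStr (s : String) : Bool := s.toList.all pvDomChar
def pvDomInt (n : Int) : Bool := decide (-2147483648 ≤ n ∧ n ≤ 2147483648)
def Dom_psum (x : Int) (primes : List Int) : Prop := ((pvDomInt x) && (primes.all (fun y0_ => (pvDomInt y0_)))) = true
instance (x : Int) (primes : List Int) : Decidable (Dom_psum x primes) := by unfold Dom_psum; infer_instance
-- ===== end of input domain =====

-- B replaces A's accumulator loop over successive powers pr^k by a recursive base-pr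
-- digit sum plus Legendre's identity, summed with map/sum; an alternative of the same cost.

-- ===== PORT A =====
-- A's inner 'while mul <= x' loop; the fuel argument is only a totality guard
-- (within Pre_psum, x.toNat + 1 iterations always suffice since mul at least doubles).
def psumLoopA (x pr : Int) : Nat → Int → Int → Int
  | 0, _, res => res
  | fuel+1, mul, res =>
      if mul ≤ x then
        psumLoopA x pr fuel (mul * pr) (res + (PySem.Int.floordiv x mul) * pr)
      else res

def psum (x : Int) (primes : List Int) : Int :=
  primes.foldl (fun res pr => psumLoopA x pr (x.toNat + 1) pr res) 0

-- ===== PORT B =====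
-- Source B's recursive digsum: '0 if n == 0 else n % pr + digsum(n // pr, pr)'.
-- The '2 ≤ pr ∧ 0 < n' guard is only a totality guard: within Pre_psum every call has
-- pr ≥ 2 and n ≥ 0, where it coincides with Python's 'n == 0' base case.
def digsum (n pr : Int) : Int :=
  if h : 2 ≤ pr ∧ 0 < n then
    PySem.Int.mod n pr + digsum (PySem.Int.floordiv n pr) pr
  else 0
termination_by n.toNat
decreasing_by
  rw [PySem.Int.floordiv_eq_ediv_of_pos (by omega)]
  have h1 : n / pr < n := by rw [Int.ediv_lt_iff_lt_mul (by omega)]; nlinarith [h.1, h.2]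
  have h2 : (0:Int) ≤ n / pr := Int.ediv_nonneg (by omega) (by omega)
  omega

def psum_alt (x : Int) (primes : List Int) : Int :=
  if x ≤ 0 then 0
  else (primes.map (fun pr =>
    PySem.Int.floordiv (pr * (x - digsum x pr)) (pr - 1))).sum

-- ===== PRECONDITION & SPEC =====
-- Pre_psum admits prime-like bases ≥ 2 (the function's natural domain) and, besides, every
-- base at all when x ≤ 0 except pr = x (there A's loop contributes nothing and both return 0).
-- It excludes: pr = 0 with x ≥ 0, where A raises ZeroDivisionError; pr ∈ {-1, 1} with x ≥ 1,
-- where A diverges; bases pr ≤ -1 with x ≥ 1, where A returns accidental values of a loop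
-- over alternating-sign powers that no caller summing prime factors of x! could want; and
-- pr = x ≤ 0, where A's first iteration accidentally adds x itself (B treats a nonpositive x
-- as having an empty factorial and returns 0).
def Pre_psum (x : Int) (primes : List Int) : Prop :=
  ∀ pr ∈ primes, 2 ≤ pr ∨ (x ≤ 0 ∧ pr ≠ x)
instance (x : Int) (primes : List Int) : Decidable (Pre_psum x primes) := by
  unfold Pre_psum; infer_instance

def pvWitness_psum : Int × List Int := (100, [2, 3, 5, 7])

def Spec_psum (x : Int) (primes : List Int) (out : Int) : Prop := out = psum_alt x primes
instance (x : Int) (primes : List Int) (out : Int) : Decidable (Spec_psum x primes out) := by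
  unfold Spec_psum; infer_instance

-- ===== CLAIM (what is proved, stated in full; the proofs are below) =====
def Claim_equal_psum : Prop := ∀ (x : Int) (primes : List Int), Dom_psum x primes → Pre_psum x primes → Spec_psum x primes (psum x primes)

-- ===== LEMMAS AND PROOFS =====

-- Mathematical value of A's inner loop: G pr y = y + ⌊y/pr⌋ + ⌊y/pr²⌋ + …
def Gfun (pr y : Int) : Int :=
  if h : 2 ≤ pr ∧ 1 ≤ y then y + Gfun pr (PySem.Int.floordiv y pr) else 0
termination_by y.toNat
decreasing_by
  rw [PySem.Int.floordiv_eq_ediv_of_pos (by omega)]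
  have h1 : y / pr < y := by rw [Int.ediv_lt_iff_lt_mul (by omega)]; nlinarith [h.1, h.2]
  have h2 : (0:Int) ≤ y / pr := Int.ediv_nonneg (by omega) (by omega)
  omega

theorem Gfun_pos {pr y : Int} (h2 : 2 ≤ pr) (hy : 1 ≤ y) :
    Gfun pr y = y + Gfun pr (PySem.Int.floordiv y pr) := by
  rw [Gfun, dif_pos ⟨h2, hy⟩]

theorem Gfun_zero {pr y : Int} (hy : ¬ (2 ≤ pr ∧ 1 ≤ y)) : Gfun pr y = 0 := by
  rw [Gfun, dif_neg hy]

theorem digsum_pos {pr n : Int} (h2 : 2 ≤ pr) (hn : 0 < n) :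
    digsum n pr = PySem.Int.mod n pr + digsum (PySem.Int.floordiv n pr) pr := by
  rw [digsum, dif_pos ⟨h2, hn⟩]

theorem digsum_zero {pr n : Int} (hn : ¬ (2 ≤ pr ∧ 0 < n)) : digsum n pr = 0 := by
  rw [digsum, dif_neg hn]

theorem fdiv_lt_of_pos {y pr : Int} (hy : 1 ≤ y) (hpr : 2 ≤ pr) :
    PySem.Int.floordiv y pr < y ∧ 0 ≤ PySem.Int.floordiv y pr := by
  rw [PySem.Int.floordiv_eq_ediv_of_pos (by omega)]
  constructor
  · rw [Int.ediv_lt_iff_lt_mul (by omega)]; nlinarith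
  · exact Int.ediv_nonneg (by omega) (by omega)

theorem loopA_eq (x pr : Int) (h2 : 2 ≤ pr) :
    ∀ (fuel : Nat) (mul res : Int), 1 ≤ mul → (PySem.Int.floordiv x mul).toNat < fuel →
      psumLoopA x pr fuel mul res = res + pr * Gfun pr (PySem.Int.floordiv x mul) := by
  intro fuel
  induction fuel with
  | zero => intro mul res _ hf; omega
  | succ f ih =>
    intro mul res hmul hf
    by_cases hm : mul ≤ x
    · have hy : 1 ≤ PySem.Int.floordiv x mul := by
        rw [PySem.Int.le_floordiv_iff_mul_le (by omega)]; omega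
      have hdd : PySem.Int.floordiv (PySem.Int.floordiv x mul) pr
          = PySem.Int.floordiv x (mul * pr) := by
        rw [PySem.Int.floordiv_eq_ediv_of_pos (show (0:Int) < pr by omega),
            PySem.Int.floordiv_eq_ediv_of_pos (show (0:Int) < mul by omega),
            PySem.Int.floordiv_eq_ediv_of_pos (show (0:Int) < mul * pr by positivity)]
        exact Int.ediv_ediv_of_nonneg (by omega)
      have hlt := fdiv_lt_of_pos hy h2
      have hrec : (PySem.Int.floordiv x (mul * pr)).toNat < f := by
        rw [← hdd]; omega
      simp only [psumLoopA, if_pos hm]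
      rw [ih (mul * pr) _ (by nlinarith) hrec, hdd.symm, Gfun_pos h2 hy]
      ring
    · have hy : PySem.Int.floordiv x mul < 1 := by
        rw [PySem.Int.floordiv_lt_iff_lt_mul (by omega)]; omega
      simp only [psumLoopA, if_neg hm]
      rw [Gfun_zero (by omega), mul_zero, add_zero]

-- Legendre's identity: (pr-1) · (⌊x/pr⌋ + ⌊x/pr²⌋ + …) = x - (base-pr digit sum of x).
theorem legendre (pr : Int) (h2 : 2 ≤ pr) :
    ∀ (n : Nat) (x : Int), 0 ≤ x → x.toNat ≤ n →
      (pr - 1) * Gfun pr (PySem.Int.floordiv x pr) = x - digsum x pr := by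
  intro n
  induction n with
  | zero =>
    intro x hx hxn
    have hx0 : x = 0 := by omega
    subst hx0
    have : PySem.Int.floordiv 0 pr = 0 := by
      rw [PySem.Int.floordiv_eq_ediv_of_pos (by omega)]; simp
    rw [this, Gfun_zero (by omega), digsum_zero (by omega)]
    ring
  | succ n ih =>
    intro x hx hxn
    by_cases hx1 : 1 ≤ x
    · have hq := fdiv_lt_of_pos hx1 h2
      have hxeq : (PySem.Int.floordiv x pr) * pr + PySem.Int.mod x pr = x :=
        PySem.Int.floordiv_mul_add_mod x pr
      rw [digsum_pos h2 (by omega)]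
      by_cases hq1 : 1 ≤ PySem.Int.floordiv x pr
      · have hih := ih (PySem.Int.floordiv x pr) (by omega) (by omega)
        rw [Gfun_pos h2 hq1]
        linear_combination hih + hxeq
      · rw [Gfun_zero (by omega), digsum_zero (by omega)]
        have hq0 : PySem.Int.floordiv x pr = 0 := by omega
        rw [hq0] at hxeq
        linear_combination hxeq
    · have hx0 : x = 0 := by omega
      subst hx0
      have : PySem.Int.floordiv 0 pr = 0 := by
        rw [PySem.Int.floordiv_eq_ediv_of_pos (by omega)]; simp
      rw [this, Gfun_zero (by omega), digsum_zero (by omega)]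
      ring

-- Per-prime equality of A's loop body and B's summand (x > 0).
theorem contrib_eq (x pr : Int) (h2 : 2 ≤ pr) (hx : 0 < x) (res : Int) :
    psumLoopA x pr (x.toNat + 1) pr res
      = res + PySem.Int.floordiv (pr * (x - digsum x pr)) (pr - 1) := by
  have hfd : PySem.Int.floordiv x pr ≤ x ∧ 0 ≤ PySem.Int.floordiv x pr := by
    rw [PySem.Int.floordiv_eq_ediv_of_pos (by omega)]
    exact ⟨Int.ediv_le_self pr (by omega), Int.ediv_nonneg (by omega) (by omega)⟩
  rw [loopA_eq x pr h2 (x.toNat + 1) pr res (by omega) (by omega)]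
  have hleg := legendre pr h2 x.toNat x (by omega) (by omega)
  have : pr * (x - digsum x pr) = (pr - 1) * (pr * Gfun pr (PySem.Int.floordiv x pr)) := by
    linear_combination pr * hleg.symm
  rw [this, PySem.Int.floordiv_eq_ediv_of_pos (show (0:Int) < pr - 1 by omega),
      Int.mul_ediv_cancel_left _ (show pr - 1 ≠ 0 by omega)]

-- When x ≤ 0 and pr ≠ x, A's loop either never runs (x < pr) or runs exactly once
-- adding ⌊x/pr⌋·pr = 0 (pr < x ≤ 0, so 0 < x/pr < 1).
theorem loopA_trivial (x pr : Int) (hx : x ≤ 0) (hne : pr ≠ x) (res : Int) :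
    psumLoopA x pr (x.toNat + 1) pr res = res := by
  have h0 : x.toNat = 0 := by omega
  rw [h0]
  by_cases hm : pr ≤ x
  · have hd : PySem.Int.floordiv x pr = 0 := by
      rw [← PySem.Int.floordiv_neg_neg,
          PySem.Int.floordiv_eq_ediv_of_pos (show (0:Int) < -pr by omega)]
      exact Int.ediv_eq_zero_of_lt (by omega) (by omega)
    simp [psumLoopA, hm, hd]
  · simp [psumLoopA, hm]

-- When x ≤ 0 every admitted base contributes nothing to A's fold.
theorem foldA_zero (x : Int) (hx : x ≤ 0) :
    ∀ (l : List Int), (∀ pr ∈ l, pr ≠ x) → ∀ res : Int,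
      l.foldl (fun res pr => psumLoopA x pr (x.toNat + 1) pr res) res = res := by
  intro l
  induction l with
  | nil => intro _ res; rfl
  | cons pr t ih =>
    intro hpre res
    simp only [List.foldl_cons]
    rw [loopA_trivial x pr hx (hpre pr (List.mem_cons_self ..)) res]
    exact ih (fun p hp => hpre p (List.mem_cons_of_mem _ hp)) res

-- A's fold equals B's map/sum (x > 0).
theorem foldA_eq_sum (x : Int) (hx : 0 < x) :
    ∀ (l : List Int), (∀ pr ∈ l, 2 ≤ pr) → ∀ res : Int,
      l.foldl (fun res pr => psumLoopA x pr (x.toNat + 1) pr res) res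
        = res + (l.map (fun pr =>
            PySem.Int.floordiv (pr * (x - digsum x pr)) (pr - 1))).sum := by
  intro l
  induction l with
  | nil => intro _ res; simp
  | cons pr t ih =>
    intro hpre res
    have h2 : 2 ≤ pr := hpre pr (List.mem_cons_self ..)
    simp only [List.foldl_cons, List.map_cons, List.sum_cons]
    rw [contrib_eq x pr h2 hx res,
        ih (fun p hp => hpre p (List.mem_cons_of_mem _ hp)) _]
    ring

-- ===== VERDICT (by name: the statement is the Claim_ definition above) =====
theorem psum_spec : Claim_equal_psum := by
  intro x primes _ hpre
  unfold Spec_psum psum psum_alt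
  by_cases hx : x ≤ 0
  · rw [if_pos hx]
    exact foldA_zero x hx primes
      (fun p hp => by rcases hpre p hp with h | h <;> omega) 0
  · rw [if_neg hx]
    rw [foldA_eq_sum x (by omega) primes
      (fun p hp => by rcases hpre p hp with h | h <;> omega) 0]
    ring
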